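-- pv_equiv track=rewrite | github.com/spotlessswipe/static-site-generator | src/blocks.py | check_if_markdown_heading
-- ===== SOURCE A (Python) =====
-- def check_if_markdown_heading(markdown: str):
--     if markdown:
--         hash_count = 0
--         for character in markdown:
--             if character == '#':
--                 hash_count += 1
--             elif character == ' ' and hash_count <=7:
--                 return True
--             else:
--                 return False
-- ===== SOURCE B (Python) =====
-- def check_if_markdown_heading(markdown: str):
--     if not markdown:
--         return None
--     stripped = markdown.lstrip('#')
--     if not stripped:
--         return None
--     hash_count = len(markdown) - len(stripped)
--     return stripped[0] == ' ' and hash_count <= 7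
-- ===== Notes on version B (the rewrite author's own statement) =====
-- stated objective: simpler
-- what changed: Replaces the per-character loop with a counter by a single leading-hash lstrip plus a length subtraction and one comparison of the first remaining character.
import Mathlib
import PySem

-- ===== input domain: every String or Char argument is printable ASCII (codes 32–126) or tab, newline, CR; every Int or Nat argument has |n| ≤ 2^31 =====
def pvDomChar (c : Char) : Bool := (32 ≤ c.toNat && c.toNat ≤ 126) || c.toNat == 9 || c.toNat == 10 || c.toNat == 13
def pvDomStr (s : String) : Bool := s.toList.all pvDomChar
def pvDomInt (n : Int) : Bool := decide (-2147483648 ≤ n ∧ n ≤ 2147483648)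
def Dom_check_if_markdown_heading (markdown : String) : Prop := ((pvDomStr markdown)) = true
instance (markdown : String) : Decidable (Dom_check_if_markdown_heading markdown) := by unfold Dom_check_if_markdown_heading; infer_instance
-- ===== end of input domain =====

-- B replaces A's per-character counting loop by lstrip('#') + a length subtraction (simpler decomposition).

-- ===== PORT A =====
-- the for-loop of A over the characters, carrying hash_count
def pvLoopA : List Char → Int → Option Bool
  | [], _ => none
  | c :: rest, hashCount =>
    if c = '#' then pvLoopA rest (hashCount + 1)
    else if c = ' ' ∧ hashCount ≤ 7 then some true
    else some false

def check_if_markdown_heading (markdown : String) : Option Bool :=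
  if markdown = "" then none
  else pvLoopA markdown.toList 0

-- ===== PORT B =====
def check_if_markdown_heading_alt (markdown : String) : Option Bool :=
  if markdown = "" then none
  else
    let stripped := markdown.toList.dropWhile (· == '#')
    match stripped with
    | [] => none
    | c :: _ =>
      let hashCount : Int := (markdown.toList.length : Int) - (stripped.length : Int)
      some (c == ' ' && hashCount ≤ 7)

-- ===== PRECONDITION & SPEC =====
def Spec_check_if_markdown_heading (markdown : String) (out : Option Bool) : Prop := out = check_if_markdown_heading_alt markdown
instance (markdown : String) (out : Option Bool) : Decidable (Spec_check_if_markdown_heading markdown out) := by unfold Spec_check_if_markdown_heading; infer_instance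

-- ===== CLAIM (what is proved, stated in full; the proofs are below) =====
def Claim_equal_check_if_markdown_heading : Prop := ∀ (markdown : String), Dom_check_if_markdown_heading markdown → Spec_check_if_markdown_heading markdown (check_if_markdown_heading markdown)

-- ===== LEMMAS AND PROOFS =====

-- the loop of A equals the dropWhile characterisation, for any starting count
theorem pvLoopA_eq (l : List Char) : ∀ (h : Int),
    pvLoopA l h =
      match l.dropWhile (· == '#') with
      | [] => none
      | c :: _ => some (c == ' ' && h + ((l.length : Int) - ((l.dropWhile (· == '#')).length : Int)) ≤ 7) := by
  induction l with
  | nil => intro h; simp [pvLoopA]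
  | cons c rest ih =>
    intro h
    by_cases hc : c = '#'
    · subst hc
      simp only [pvLoopA, List.dropWhile_cons, ih (h + 1)]
      cases hd : rest.dropWhile (· == '#') with
      | nil => simp
      | cons d ds =>
        norm_num
        congr 1
        rw [decide_eq_decide]
        omega
    · have hb : (c == '#') = false := by simp [hc]
      simp only [pvLoopA, if_neg hc, List.dropWhile_cons, hb]
      simp only [Bool.false_eq_true, if_false]
      split_ifs with hcond
      · obtain ⟨hs, h7⟩ := hcond
        subst hs
        simp
        omega
      · by_cases hs : c = ' '
        · subst hs
          have h7 : ¬ h ≤ 7 := fun hh => hcond ⟨rfl, hh⟩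
          simp
          omega
        · simp [hs]

theorem ports_agree (markdown : String) :
    check_if_markdown_heading markdown = check_if_markdown_heading_alt markdown := by
  unfold check_if_markdown_heading check_if_markdown_heading_alt
  by_cases he : markdown = ""
  · simp [he]
  · simp only [if_neg he]
    rw [pvLoopA_eq]
    cases hd : markdown.toList.dropWhile (· == '#') with
    | nil => simp
    | cons c cs =>
      rw [Int.zero_add]

-- ===== VERDICT (by name: the statement is the Claim_ definition above) =====
theorem check_if_markdown_heading_spec : Claim_equal_check_if_markdown_heading := by
  intro markdown _
  unfold Spec_check_if_markdown_heading
  exact ports_agree markdown
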